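-- pv_equiv track=rewrite | github.com/drholix/ORC | app/inference.py | _extract_unknown_argument
-- ===== SOURCE A (Python) =====
-- def _extract_unknown_argument(message: str) -> str | None:
--     markers = ["Unknown argument", "unexpected keyword argument"]
--     tail = None
--     for marker in markers:
--         if marker in message:
--             tail = message.split(marker, 1)[1]
--             break
--     if tail is None:
--         return None
--     # Handle messages like "Unknown argument: use_gpu" or TypeError variants.
--     if ":" in tail:
--         candidate = tail.split(":", 1)[1]
--     else:
--         candidate = tail
--     candidate = candidate.strip()
--     for delimiter in (" ", "\n", ".", ","):
--         if delimiter in candidate: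
--             candidate = candidate.split(delimiter, 1)[0]
--     return candidate.strip("'\" ") or None
-- ===== SOURCE B (Python) =====
-- def _extract_unknown_argument(message):
--     for marker in ("Unknown argument", "unexpected keyword argument"):
--         i = message.find(marker)
--         if i != -1:
--             tail = message[i + len(marker):]
--             # drop everything up to and including the first colon (find = -1 keeps all)
--             candidate = tail[tail.find(":") + 1:].strip()
--             name = []
--             for ch in candidate:
--                 if ch in " \n.,":
--                     break
--                 name.append(ch)
--             result = "".join(name).strip("'\" ")
--             return result if result else None
--     return None
-- ===== Notes on version B (the rewrite author's own statement) =====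
-- stated objective: alternative
-- what changed: B replaces A's membership-test-plus-split marker loop, conditional colon split and four sequential delimiter splits by index arithmetic on a single find() per marker (slicing past the marker and past an optional colon in one expression) and a single character scan that stops at the first delimiter.
import Mathlib
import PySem

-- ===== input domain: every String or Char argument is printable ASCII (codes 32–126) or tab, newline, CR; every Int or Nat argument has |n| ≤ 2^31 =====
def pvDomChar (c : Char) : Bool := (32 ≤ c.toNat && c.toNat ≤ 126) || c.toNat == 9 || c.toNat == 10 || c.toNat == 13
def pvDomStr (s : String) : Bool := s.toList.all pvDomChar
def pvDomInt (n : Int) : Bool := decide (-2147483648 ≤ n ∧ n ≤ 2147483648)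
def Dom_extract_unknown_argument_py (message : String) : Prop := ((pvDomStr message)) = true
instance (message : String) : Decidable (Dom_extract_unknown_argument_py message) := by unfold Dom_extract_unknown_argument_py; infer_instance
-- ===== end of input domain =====

-- B replaces A's marker `in`+split loop, optional colon split and four sequential
-- delimiter splits by index arithmetic on a single `find` and one character scan
-- (objective: alternative; same return value on every input).

-- ===== PORT A =====
-- the post-marker part of A (colon split, strip, the four delimiter splits, quote strip)
def pvProcessA (tail : String) : Option String :=
  let candidate :=
    if PySem.Str.isIn ":" tail then
      ((PySem.Str.splitMax? tail ":" 1).getD []).getD 1 ""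
    else tail
  let candidate := PySem.Str.strip candidate
  let candidate := [" ", "\n", ".", ","].foldl (fun c d =>
    if PySem.Str.isIn d c then ((PySem.Str.splitMax? c d 1).getD []).getD 0 "" else c) candidate
  let result := PySem.Str.stripChars candidate "'\" "
  if result = "" then none else some result

def extract_unknown_argument_py (message : String) : Option String :=
  let markers : List String := ["Unknown argument", "unexpected keyword argument"]
  let tail? : Option String := markers.foldl (fun acc marker =>
    match acc with
    | some t => some t
    | none =>
      if PySem.Str.isIn marker message then
        some (((PySem.Str.splitMax? message marker 1).getD []).getD 1 "")
      else none) none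
  match tail? with
  | none => none
  | some tail => pvProcessA tail

-- ===== PORT B =====
-- the `for ch in candidate: if ch in " \n.,": break; name.append(ch)` loop of Source B
def pvTakeName : List Char → List Char
  | [] => []
  | c :: rest => if [' ', '\n', '.', ','].contains c then [] else c :: pvTakeName rest

-- the body of Source B's found-marker branch, given the tail after the marker
def pvProcessB (tail : String) : Option String :=
  let candidate := PySem.Str.strip (PySem.Str.slice tail (some (PySem.Str.find tail ":" + 1)) none)
  let result := PySem.Str.stripChars (String.ofList (pvTakeName candidate.toList)) "'\" "
  if result != "" then some result else none

-- the `for marker in (…): … return …` loop of Source B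
def pvAltGo (message : String) : List String → Option String
  | [] => none
  | marker :: rest =>
    let i := PySem.Str.find message marker
    if i != -1 then
      pvProcessB (PySem.Str.slice message (some (i + PySem.Str.len marker)) none)
    else pvAltGo message rest

def extract_unknown_argument_py_alt (message : String) : Option String :=
  pvAltGo message ["Unknown argument", "unexpected keyword argument"]

-- ===== PRECONDITION & SPEC =====
def Spec_extract_unknown_argument_py (message : String) (out : Option String) : Prop := out = extract_unknown_argument_py_alt message
instance (message : String) (out : Option String) : Decidable (Spec_extract_unknown_argument_py message out) := by unfold Spec_extract_unknown_argument_py; infer_instance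

-- ===== CLAIM (what is proved, stated in full; the proofs are below) =====
def Claim_equal_extract_unknown_argument_py : Prop := ∀ (message : String), Dom_extract_unknown_argument_py message → Spec_extract_unknown_argument_py message (extract_unknown_argument_py message)

-- ===== LEMMAS AND PROOFS =====

-- splitOnMax.go with maxsplit exhausted just flushes its state
theorem pv_go_zero (sep : List Char) (fuel : Nat) (l cur : List Char) (acc : List (List Char)) :
    PySem.Chars.splitOnMax.go sep fuel 0 l cur acc = ((cur.reverse ++ l) :: acc).reverse := by
  cases fuel with
  | zero => simp [PySem.Chars.splitOnMax.go]
  | succ f => cases l with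
    | nil => simp [PySem.Chars.splitOnMax.go]
    | cons c r => simp [PySem.Chars.splitOnMax.go]

-- find.go either fails or returns an offset ≥ its counter
theorem pv_findgo_shape (sub : List Char) : ∀ (l : List Char) (k : Nat),
    PySem.Chars.find.go sub l k = -1 ∨ ∃ m : Nat, PySem.Chars.find.go sub l k = (k : Int) + m := by
  intro l
  induction l with
  | nil =>
    intro k
    by_cases h : sub.isEmpty
    · right; exact ⟨0, by simp [PySem.Chars.find.go, h]⟩
    · left; simp [PySem.Chars.find.go, h]
  | cons c r ih =>
    intro k
    by_cases h : sub.isPrefixOf (c :: r)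
    · right; exact ⟨0, by simp [PySem.Chars.find.go, h]⟩
    · rcases ih (k+1) with h1 | ⟨m, h1⟩
      · left; simpa [PySem.Chars.find.go, h] using h1
      · right; exact ⟨m+1, by simp [PySem.Chars.find.go, h]; rw [h1]; push_cast; ring⟩

-- a single split with maxsplit=1, characterised by find.go
theorem pv_go_one (sep : List Char) (hsep : sep ≠ []) :
    ∀ (l : List Char) (fuel k : Nat) (cur : List Char) (acc : List (List Char)), l.length < fuel →
    (PySem.Chars.find.go sep l k = -1 ∧
      PySem.Chars.splitOnMax.go sep fuel 1 l cur acc = ((cur.reverse ++ l) :: acc).reverse) ∨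
    (∃ j : Nat, PySem.Chars.find.go sep l k = (k : Int) + j ∧
      PySem.Chars.splitOnMax.go sep fuel 1 l cur acc
        = (l.drop (j + sep.length) :: (cur.reverse ++ l.take j) :: acc).reverse) := by
  intro l
  induction l with
  | nil =>
    intro fuel k cur acc hf
    left
    cases fuel with
    | zero => omega
    | succ f =>
      constructor
      · simp [PySem.Chars.find.go, List.isEmpty_iff, hsep]
      · simp [PySem.Chars.splitOnMax.go]
  | cons c r ih =>
    intro fuel k cur acc hf
    cases fuel with
    | zero => omega
    | succ f =>
      by_cases h : sep.isPrefixOf (c :: r)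
      · right
        refine ⟨0, by simp [PySem.Chars.find.go, h], ?_⟩
        have : PySem.Chars.splitOnMax.go sep (f+1) 1 (c :: r) cur acc
            = PySem.Chars.splitOnMax.go sep f 0 (List.drop sep.length (c :: r)) [] (cur.reverse :: acc) := by
          simp [PySem.Chars.splitOnMax.go, h]
        rw [this, pv_go_zero]
        simp
      · have hless : r.length < f := by simp at hf; omega
        have step : PySem.Chars.splitOnMax.go sep (f+1) 1 (c :: r) cur acc
            = PySem.Chars.splitOnMax.go sep f 1 r (c :: cur) acc := by
          simp [PySem.Chars.splitOnMax.go, h]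
        have stepf : PySem.Chars.find.go sep (c :: r) k = PySem.Chars.find.go sep r (k+1) := by
          simp [PySem.Chars.find.go, h]
        rcases ih f (k+1) (c :: cur) acc hless with ⟨h1, h2⟩ | ⟨j, h1, h2⟩
        · left
          refine ⟨by rw [stepf]; exact h1, ?_⟩
          rw [step, h2]; simp
        · right
          refine ⟨j+1, by rw [stepf, h1]; push_cast; ring, ?_⟩
          rw [step, h2]
          have hx : j + 1 + sep.length = (j + sep.length) + 1 := by ring
          simp [hx, List.take_succ_cons]

-- the split actually performed when the separator occurs
theorem pv_split_found (sep l : List Char) (hsep : sep ≠ []) (j : Nat)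
    (hf : PySem.Chars.find l sep = (j : Int)) :
    PySem.Chars.splitOnMax l sep 1 = [l.take j, l.drop (j + sep.length)] := by
  have hfuel : l.length < l.length + 1 := by omega
  rcases pv_go_one sep hsep l (l.length + 1) 0 [] [] hfuel with ⟨h1, h2⟩ | ⟨j', h1, h2⟩
  · rw [show PySem.Chars.find l sep = PySem.Chars.find.go sep l 0 from rfl] at hf
    rw [h1] at hf; omega
  · rw [show PySem.Chars.find l sep = PySem.Chars.find.go sep l 0 from rfl] at hf
    rw [h1] at hf
    have : j' = j := by omega
    subst this
    rw [PySem.Chars.splitOnMax]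
    simp at h2 ⊢
    rw [h2]

-- single-character find position = takeWhile boundary
theorem pv_take_findgo (d : Char) :
    ∀ (cs : List Char) (k j : Nat), PySem.Chars.find.go [d] cs k = (k : Int) + j →
      cs.take j = cs.takeWhile (fun c => c != d) := by
  intro cs
  induction cs with
  | nil =>
    intro k j h
    simp [PySem.Chars.find.go] at h
    omega
  | cons c r ih =>
    intro k j h
    by_cases hc : c = d
    · have : PySem.Chars.find.go [d] (c :: r) k = (k : Int) := by
        simp [PySem.Chars.find.go, List.isPrefixOf, hc]
      rw [this] at h
      have hj : j = 0 := by omega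
      subst hj hc
      simp [List.takeWhile]
    · have hpre : ¬ List.isPrefixOf [d] (c :: r) = true := by
        simp [List.isPrefixOf]; exact fun h' => hc h'.symm
      have hstep : PySem.Chars.find.go [d] (c :: r) k = PySem.Chars.find.go [d] r (k+1) := by
        simp [PySem.Chars.find.go, hpre]
      rw [hstep] at h
      rcases pv_findgo_shape [d] r (k+1) with h1 | ⟨m, h1⟩
      · rw [h1] at h; omega
      · rw [h1] at h
        have hj : j = m + 1 := by push_cast at h; omega
        subst hj
        have hne : (c != d) = true := by simp [hc]
        simp [List.takeWhile, hne]
        exact ih (k+1) m h1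

theorem pv_notfound_takeWhile (d : Char) (cs : List Char)
    (hf : PySem.Chars.find cs [d] = -1) : cs.takeWhile (fun c => c != d) = cs := by
  have hmem : d ∉ cs := by
    have := (PySem.Chars.find_eq_neg_one_iff cs [d]).mp hf
    rwa [List.singleton_infix_iff] at this
  rw [List.takeWhile_eq_self_iff]
  intro a ha
  simp
  exact fun h => hmem (h ▸ ha)

-- one delimiter pass of A = one takeWhile
theorem pv_cut_single (d : Char) (cs : List Char) :
    (if PySem.Chars.isIn [d] cs then (PySem.Chars.splitOnMax cs [d] 1).getD 0 [] else cs)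
      = cs.takeWhile (fun c => c != d) := by
  by_cases h : PySem.Chars.isIn [d] cs
  · rcases pv_findgo_shape [d] cs 0 with h1 | ⟨j, h1⟩
    · rw [PySem.Chars.isIn] at h
      rw [show PySem.Chars.find cs [d] = PySem.Chars.find.go [d] cs 0 from rfl] at h
      simp [h1] at h
    · have hfind : PySem.Chars.find cs [d] = (j : Int) := by
        rw [show PySem.Chars.find cs [d] = PySem.Chars.find.go [d] cs 0 from rfl, h1]; simp
      rw [if_pos h, pv_split_found [d] cs (by simp) j hfind]
      simpa using (pv_take_findgo d cs 0 j (by simpa using h1))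
  · rw [if_neg h]
    have hfind : PySem.Chars.find cs [d] = -1 := by
      rw [PySem.Chars.isIn] at h
      simpa using h
    exact (pv_notfound_takeWhile d cs hfind).symm

-- one delimiter pass of A, on strings
theorem pv_cut_single_str (ds : String) (d : Char) (hd : ds.toList = [d]) (s : String) :
    (if PySem.Str.isIn ds s then ((PySem.Str.splitMax? s ds 1).getD []).getD 0 "" else s)
      = String.ofList (s.toList.takeWhile (fun c => c != d)) := by
  have hiff : PySem.Str.isIn ds s = PySem.Chars.isIn [d] s.toList := by
    rw [PySem.Str.isIn_eq, hd]
  have hcut := pv_cut_single d s.toList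
  by_cases h : PySem.Chars.isIn [d] s.toList
  · rw [if_pos (by rw [hiff]; exact h)]
    rw [if_pos h] at hcut
    rw [PySem.Str.splitMax?, hd]
    simp [PySem.Chars.splitMax?]
    rw [show (PySem.Chars.splitOnMax s.toList [d] 1)[0]?.getD [] = (PySem.Chars.splitOnMax s.toList [d] 1).getD 0 [] from rfl, hcut]
  · rw [if_neg (by rw [hiff]; exact h)]
    rw [if_neg h] at hcut
    apply String.toList_inj.mp
    simp only [String.toList_ofList]
    exact hcut

theorem pv_takeWhile_takeWhile (p q : Char → Bool) (l : List Char) :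
    List.takeWhile p (List.takeWhile q l) = l.takeWhile (fun c => q c && p c) := by
  induction l with
  | nil => rfl
  | cons c r ih => by_cases h : q c <;> by_cases h2 : p c <;> simp [List.takeWhile, h, h2, ih]

theorem pv_takeName_eq (cs : List Char) :
    pvTakeName cs = cs.takeWhile
      (fun c => ((c != ' ') && (c != '\n')) && (c != '.') && (c != ',')) := by
  induction cs with
  | nil => rfl
  | cons c r ih =>
    by_cases h : ([' ', '\n', '.', ','].contains c)
    · have hb : (c != ' ' && c != '\n' && c != '.' && c != ',') = false := by
        simp at h; rcases h with h|h|h|h <;> subst h <;> decide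
      simp only [pvTakeName, List.takeWhile, h, hb, if_pos]
    · have hb : (c != ' ' && c != '\n' && c != '.' && c != ',') = true := by
        simp at h ⊢; tauto
      simp only [pvTakeName, List.takeWhile, hb]
      rw [if_neg (by simpa using h)]
      simp [ih]

-- A's four sequential delimiter splits = B's single character scan
theorem pv_cuts_eq (s : String) :
    ([" ", "\n", ".", ","].foldl (fun c d =>
      if PySem.Str.isIn d c then ((PySem.Str.splitMax? c d 1).getD []).getD 0 "" else c) s)
    = String.ofList (pvTakeName s.toList) := by
  simp only [List.foldl]
  rw [pv_cut_single_str " " ' ' rfl s]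
  rw [pv_cut_single_str "\n" '\n' rfl _]
  rw [pv_cut_single_str "." '.' rfl _]
  rw [pv_cut_single_str "," ',' rfl _]
  simp only [String.toList_ofList, pv_takeWhile_takeWhile]
  rw [pv_takeName_eq]

-- A's tail after a found marker = B's slice
theorem pv_tail_eq (message marker : String) (hm : marker.toList ≠ [])
    (hin : PySem.Str.isIn marker message = true) :
    ((PySem.Str.splitMax? message marker 1).getD []).getD 1 ""
      = PySem.Str.slice message (some (PySem.Str.find message marker + PySem.Str.len marker)) none := by
  obtain ⟨j, hj⟩ : ∃ j : Nat, PySem.Chars.find message.toList marker.toList = (j : Int) := by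
    rcases pv_findgo_shape marker.toList message.toList 0 with h1 | ⟨m, h1⟩
    · rw [PySem.Str.isIn_eq, PySem.Chars.isIn] at hin
      rw [show PySem.Chars.find message.toList marker.toList
            = PySem.Chars.find.go marker.toList message.toList 0 from rfl, h1] at hin
      simp at hin
    · exact ⟨m, by rw [show PySem.Chars.find message.toList marker.toList
            = PySem.Chars.find.go marker.toList message.toList 0 from rfl, h1]; simp⟩
  apply String.toList_inj.mp
  rw [PySem.Str.splitMax?]
  simp only [PySem.Chars.splitMax?, List.isEmpty_iff, hm, if_false]
  rw [pv_split_found marker.toList message.toList hm j hj]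
  rw [PySem.Str.toList_slice, PySem.Chars.slice_eq_listSlice]
  rw [PySem.Str.find_eq, PySem.Str.len_eq, hj]
  rw [PySem.List.slice_from message.toList (by positivity)]
  have : ((j : Int) + (marker.toList.length : Int)).toNat = j + marker.toList.length := by omega
  rw [this]
  simp

theorem pv_isIn_find (sub s : String) :
    PySem.Str.isIn sub s = (PySem.Str.find s sub != -1) := by
  rw [PySem.Str.isIn_eq, PySem.Str.find_eq]; rfl

-- A's shared post-marker processing = B's, for the same tail
theorem pv_core_eq (tail : String) : pvProcessA tail = pvProcessB tail := by
  unfold pvProcessA pvProcessB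
  have hcand : (if PySem.Str.isIn ":" tail then
        ((PySem.Str.splitMax? tail ":" 1).getD []).getD 1 "" else tail)
      = PySem.Str.slice tail (some (PySem.Str.find tail ":" + 1)) none := by
    by_cases h : PySem.Str.isIn ":" tail
    · rw [if_pos h, pv_tail_eq tail ":" (by decide) h,
         show PySem.Str.len ":" = (1:Int) from by decide]
    · rw [if_neg h]
      have hf : PySem.Str.find tail ":" = -1 := by
        rw [pv_isIn_find] at h; simpa using h
      apply String.toList_inj.mp
      rw [PySem.Str.toList_slice, PySem.Chars.slice_eq_listSlice, hf]
      norm_num [PySem.List.slice_from tail.toList (le_refl (0:Int))]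
  simp only []
  rw [hcand, pv_cuts_eq]
  set r := PySem.Str.stripChars (String.ofList (pvTakeName (PySem.Str.strip (PySem.Str.slice tail (some (PySem.Str.find tail ":" + 1)) none)).toList)) "'\" " with hr
  by_cases hempty : r = ""
  · simp [hempty]
  · simp [hempty]

-- ===== VERDICT (by name: the statement is the Claim_ definition above) =====
theorem extract_unknown_argument_py_spec : Claim_equal_extract_unknown_argument_py := by
  intro message _
  unfold Spec_extract_unknown_argument_py extract_unknown_argument_py extract_unknown_argument_py_alt
  simp only [List.foldl]
  by_cases h1 : PySem.Str.isIn "Unknown argument" message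
  · have hf1 : (PySem.Str.find message "Unknown argument" != -1) = true := by
      rw [← pv_isIn_find]; exact h1
    simp only [h1, if_true]
    simp only [pvAltGo, hf1, if_true]
    have ht := pv_tail_eq message "Unknown argument" (by decide) h1
    rw [ht]
    exact pv_core_eq _
  · have hf1 : (PySem.Str.find message "Unknown argument" != -1) = false := by
      rw [← pv_isIn_find]; simpa using h1
    by_cases h2 : PySem.Str.isIn "unexpected keyword argument" message
    · have hf2 : (PySem.Str.find message "unexpected keyword argument" != -1) = true := by
        rw [← pv_isIn_find]; exact h2
      simp only [pvAltGo, h1, h2, hf1, hf2, if_true, if_false, Bool.false_eq_true]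
      have ht := pv_tail_eq message "unexpected keyword argument" (by decide) h2
      rw [ht]
      exact pv_core_eq _
    · have hf2 : (PySem.Str.find message "unexpected keyword argument" != -1) = false := by
        rw [← pv_isIn_find]; simpa using h2
      have g1 : PySem.Chars.isIn ['U', 'n', 'k', 'n', 'o', 'w', 'n', ' ', 'a', 'r', 'g', 'u', 'm', 'e', 'n', 't'] message.toList = false := by
        rw [show ['U', 'n', 'k', 'n', 'o', 'w', 'n', ' ', 'a', 'r', 'g', 'u', 'm', 'e', 'n', 't'] = "Unknown argument".toList from rfl, ← PySem.Str.isIn_eq]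
        simpa using h1
      have g2 : PySem.Chars.isIn ['u', 'n', 'e', 'x', 'p', 'e', 'c', 't', 'e', 'd', ' ', 'k', 'e', 'y', 'w', 'o', 'r', 'd', ' ', 'a', 'r', 'g', 'u', 'm', 'e', 'n', 't'] message.toList = false := by
        rw [show ['u', 'n', 'e', 'x', 'p', 'e', 'c', 't', 'e', 'd', ' ', 'k', 'e', 'y', 'w', 'o', 'r', 'd', ' ', 'a', 'r', 'g', 'u', 'm', 'e', 'n', 't'] = "unexpected keyword argument".toList from rfl, ← PySem.Str.isIn_eq]
        simpa using h2
      have e1 : PySem.Chars.find message.toList ['U', 'n', 'k', 'n', 'o', 'w', 'n', ' ', 'a', 'r', 'g', 'u', 'm', 'e', 'n', 't'] = -1 := by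
        rw [show ['U', 'n', 'k', 'n', 'o', 'w', 'n', ' ', 'a', 'r', 'g', 'u', 'm', 'e', 'n', 't'] = "Unknown argument".toList from rfl, ← PySem.Str.find_eq]
        simpa using hf1
      have e2 : PySem.Chars.find message.toList ['u', 'n', 'e', 'x', 'p', 'e', 'c', 't', 'e', 'd', ' ', 'k', 'e', 'y', 'w', 'o', 'r', 'd', ' ', 'a', 'r', 'g', 'u', 'm', 'e', 'n', 't'] = -1 := by
        rw [show ['u', 'n', 'e', 'x', 'p', 'e', 'c', 't', 'e', 'd', ' ', 'k', 'e', 'y', 'w', 'o', 'r', 'd', ' ', 'a', 'r', 'g', 'u', 'm', 'e', 'n', 't'] = "unexpected keyword argument".toList from rfl, ← PySem.Str.find_eq]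
        simpa using hf2
      simp [pvAltGo, g1, g2, e1, e2]
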